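-- pv_equiv track=rewrite | github.com/maximilianruesch/sector-lengths | lib/jax_qgeo/qgeo.py | coeff_k_local
-- ===== SOURCE A (Python) =====
-- def weight_str(s):
--     """ # of non-trivial (non-identity) terms in Pauli string """
--     return len(s) - s.count('I')
--
-- def coeff_k_local(coeff, n, k_vec):
--     """ returns coefficients corresponding to k-local interactions in dict of n qubits
--     param:  coeff : dictionary
--             n, k  : integer
--     returns: dict : (string, float), dictionary of Pauli strings and corresponding coefficients
--     """
--     # todo move to qgeo
--
--     if type(k_vec) == int:
--         k_vec = [k_vec] # transform to list
--
--     # case 1: return exactly k-local & non-vanishing terms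
--     if len(k_vec) == 1:
--         coeff_out = dict((k, v) for k, v in coeff.items() if weight_str(k) == k_vec[0] \
--         and v != 0 )
--
--     # case 2: return terms corresponding to elements in k-vector
--     else:
--         coeff_out = dict()
--         for k_el in k_vec:
--             coeff_out.update(coeff_k_local(coeff, n, [k_el] ))
--     return coeff_out
-- ===== SOURCE B (Python) =====
-- def coeff_k_local(coeff, n, k_vec):
--     """ returns coefficients corresponding to k-local interactions in dict of n qubits """
--     if type(k_vec) == int:
--         k_vec = [k_vec]
--
--     # single pass: group the non-vanishing entries by their weight
--     buckets = {}
--     for key, val in coeff.items():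
--         if val != 0:
--             w = sum(1 for c in key if c != 'I')
--             buckets[w] = buckets.get(w, []) + [(key, val)]
--
--     # assemble the requested weights, each distinct weight once, in order
--     out = {}
--     for w in dict.fromkeys(k_vec):
--         for key, val in buckets.get(w, []):
--             out[key] = val
--     return out
-- ===== Notes on version B (the rewrite author's own statement) =====
-- stated objective: faster
-- what changed: B replaces A's per-k rescans of coeff (one full filtering pass per element of k_vec, via recursion and dict.update) by a single bucketing pass that groups the non-zero entries by weight, then assembles the buckets for the distinct weights of k_vec in order; Pre_ additionally requires the keys of coeff to be pairwise distinct, because a key-value list with duplicate keys does not denote a Python dict (dict() collapses duplicates before either program runs).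
import Mathlib
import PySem

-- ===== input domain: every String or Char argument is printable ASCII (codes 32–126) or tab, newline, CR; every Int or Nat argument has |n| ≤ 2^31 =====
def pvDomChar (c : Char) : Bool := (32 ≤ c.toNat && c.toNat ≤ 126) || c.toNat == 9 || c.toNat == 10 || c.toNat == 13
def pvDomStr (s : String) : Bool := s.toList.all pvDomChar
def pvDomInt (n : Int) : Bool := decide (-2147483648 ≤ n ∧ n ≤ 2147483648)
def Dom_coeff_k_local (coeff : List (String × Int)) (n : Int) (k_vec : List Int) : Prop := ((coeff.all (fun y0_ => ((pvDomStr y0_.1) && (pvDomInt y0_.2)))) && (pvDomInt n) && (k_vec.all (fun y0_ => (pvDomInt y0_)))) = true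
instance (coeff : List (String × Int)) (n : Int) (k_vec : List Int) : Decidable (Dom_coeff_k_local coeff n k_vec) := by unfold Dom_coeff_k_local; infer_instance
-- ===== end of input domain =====

-- B replaces A's per-k rescans of coeff by one bucketing pass over coeff plus one assembly pass over the distinct weights of k_vec (objective: faster).

-- ===== PORT A =====
def weight_str (s : String) : Int :=
  (PySem.Str.len s : Int) - (PySem.Str.count s "I" : Int)

-- the `type(k_vec) == int` branch of A is vacuous here: k_vec is always a list under the type convention
def coeff_k_local (coeff : List (String × Int)) (n : Int) (k_vec : List Int) : List (String × Int) :=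
  if k_vec.length = 1 then
    (coeff.foldl (fun d p =>
        if weight_str p.1 = PySem.List.pyGetD k_vec 0 0 ∧ p.2 ≠ 0 then d.insert p.1 p.2 else d)
      (PySem.Dict.empty : PySem.Dict String Int)).items
  else
    ((k_vec.attach.map (fun q => coeff_k_local coeff n [q.1])).foldl
        (fun d l => d.update l) (PySem.Dict.empty : PySem.Dict String Int)).items
termination_by k_vec.length
decreasing_by
  have := List.length_pos_of_mem q.2
  simp only [List.length_cons, List.length_nil]
  omega

-- ===== PORT B =====
def coeff_k_local_alt (coeff : List (String × Int)) (n : Int) (k_vec : List Int) : List (String × Int) :=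
  let buckets : PySem.Dict Int (List (String × Int)) :=
    coeff.foldl (fun d p =>
      if p.2 ≠ 0 then d.insert (weight_str p.1) (d.getD (weight_str p.1) [] ++ [p]) else d)
      PySem.Dict.empty
  let out : PySem.Dict String Int :=
    (PySem.List.dedup k_vec).foldl
      (fun o w => (buckets.getD w []).foldl (fun o p => o.insert p.1 p.2) o)
      PySem.Dict.empty
  out.items

-- ===== PRECONDITION & SPEC =====
-- Pre_ requires the keys of coeff to be pairwise distinct: a key-value list with duplicate
-- keys does not denote a Python dict (dict() collapses duplicates before A ever runs), so
-- such lists are outside the function's natural domain.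
def Pre_coeff_k_local (coeff : List (String × Int)) (n : Int) (k_vec : List Int) : Prop :=
  (coeff.map Prod.fst).Nodup
instance (coeff : List (String × Int)) (n : Int) (k_vec : List Int) : Decidable (Pre_coeff_k_local coeff n k_vec) := by unfold Pre_coeff_k_local; infer_instance

def pvWitness_coeff_k_local : (List (String × Int)) × Int × List Int :=
  ([("XI", 1), ("IX", 2), ("II", 3)], 2, [1])

def Spec_coeff_k_local (coeff : List (String × Int)) (n : Int) (k_vec : List Int) (out : List (String × Int)) : Prop := out = coeff_k_local_alt coeff n k_vec
instance (coeff : List (String × Int)) (n : Int) (k_vec : List Int) (out : List (String × Int)) : Decidable (Spec_coeff_k_local coeff n k_vec out) := by unfold Spec_coeff_k_local; infer_instance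

-- ===== CLAIM (what is proved, stated in full; the proofs are below) =====
def Claim_equal_coeff_k_local : Prop := ∀ (coeff : List (String × Int)) (n : Int) (k_vec : List Int), Dom_coeff_k_local coeff n k_vec → Pre_coeff_k_local coeff n k_vec → Spec_coeff_k_local coeff n k_vec (coeff_k_local coeff n k_vec)

-- ===== LEMMAS AND PROOFS =====

-- the entries of coeff kept for weight k
def pvKeep (k : Int) (p : String × Int) : Bool := decide (weight_str p.1 = k) && decide (p.2 ≠ 0)
def pvF (coeff : List (String × Int)) (k : Int) : List (String × Int) := coeff.filter (pvKeep k)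

lemma pvF_map_fst_nodup (coeff : List (String × Int)) (k : Int)
    (h : (coeff.map Prod.fst).Nodup) : ((pvF coeff k).map Prod.fst).Nodup :=
  List.Nodup.sublist (List.Sublist.map Prod.fst (List.filter_sublist (l := coeff))) h

lemma pv_weight_of_mem {coeff : List (String × Int)} {k : Int} {p : String × Int}
    (h : p ∈ pvF coeff k) : weight_str p.1 = k := by
  have := List.of_mem_filter h
  simp [pvKeep] at this
  exact this.1

-- A on a singleton k_vec is exactly the weight-k filter of coeff
lemma L_A1 (coeff : List (String × Int)) (n : Int) (k : Int)
    (hpre : (coeff.map Prod.fst).Nodup) :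
    coeff_k_local coeff n [k] = pvF coeff k := by
  rw [coeff_k_local]
  simp only [List.length_cons, List.length_nil, if_true, ite_true]
  have hcond : (fun (d : PySem.Dict String Int) (p : String × Int) =>
      if weight_str p.1 = PySem.List.pyGetD [k] 0 0 ∧ p.2 ≠ 0 then d.insert p.1 p.2 else d)
      = (fun d p => if pvKeep k p = true then d.insert p.1 p.2 else d) := by
    funext d p
    by_cases h : weight_str p.1 = k ∧ p.2 ≠ 0
    · rw [if_pos, if_pos] <;>
        simp_all [pvKeep, PySem.List.pyGetD, PySem.List.pyGet?, PySem.List.pyIdx?]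
    · rw [if_neg, if_neg] <;>
        simp_all [pvKeep, PySem.List.pyGetD, PySem.List.pyGet?, PySem.List.pyIdx?]
  rw [hcond, ← List.foldl_filter]
  rw [PySem.Dict.items_foldl_insert_fresh (coeff.filter (pvKeep k)) Prod.fst Prod.snd _
    (fun a _ => PySem.Dict.contains_empty a.1)
    (pvF_map_fst_nodup coeff k hpre)]
  simp [pvF, PySem.Dict.empty]

-- the bucket dict of B holds, at w, exactly the kept entries of weight w
lemma L_buckets (w : Int) : ∀ (l : List (String × Int)) (d : PySem.Dict Int (List (String × Int))),
    (l.foldl (fun d p =>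
      if p.2 ≠ 0 then d.insert (weight_str p.1) (d.getD (weight_str p.1) [] ++ [p]) else d) d).getD w []
    = d.getD w [] ++ l.filter (pvKeep w) := by
  intro l
  induction l with
  | nil => simp
  | cons p t ih =>
    intro d
    simp only [List.foldl_cons, List.filter_cons]
    by_cases hp : p.2 = 0
    · rw [if_neg (by simpa using hp)]
      have hk : pvKeep w p = false := by simp [pvKeep, hp]
      rw [ih d, hk]
      simp
    · rw [if_pos (by simpa using hp)]
      rw [ih]
      rw [PySem.Dict.getD_insert]
      by_cases hw : w = weight_str p.1
      · rw [if_pos hw]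
        have hk : pvKeep w p = true := by simp [pvKeep, hw.symm, hp]
        rw [hk]
        simp [hw]
      · rw [if_neg hw]
        have hk : pvKeep w p = false := by
          simp only [pvKeep, Bool.and_eq_false_iff, decide_eq_false_iff_not]
          exact Or.inl (fun h => hw h.symm)
        rw [hk]
        simp

lemma L_ins_id {d : PySem.Dict String Int} {k : String} {v : Int}
    (hnd : d.keys.Nodup) (h : d.get? k = some v) : d.insert k v = d := by
  have hc : d.contains k = true := by
    rw [PySem.Dict.contains_eq_isSome_get?, h]; rfl
  apply PySem.Dict.ext
  rw [PySem.Dict.items_insert_of_contains d v hc]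
  have hcongr : ∀ q ∈ d.items, (fun p => if (p.1 == k) = true then (k, v) else p) q = id q := by
    intro q hq
    by_cases hk : q.1 = k
    · have : d.get? q.1 = some q.2 := PySem.Dict.get?_of_mem_items d hq hnd
      rw [hk, h] at this
      obtain ⟨q1, q2⟩ := q
      simp only at hk
      subst hk
      simp_all
    · simp [hk]
  rw [List.map_congr_left hcongr, List.map_id]

lemma L_upd_id : ∀ (l : List (String × Int)) (d : PySem.Dict String Int),
    d.keys.Nodup → (∀ p ∈ l, d.get? p.1 = some p.2) → d.update l = d := by
  intro l
  induction l with
  | nil => intro d _ _; rfl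
  | cons p t ih =>
    intro d hnd h
    have h1 : d.insert p.1 p.2 = d := L_ins_id hnd (h p (by simp))
    show (d.insert p.1 p.2).update t = d
    rw [h1]
    exact ih d hnd (fun q hq => h q (by simp [hq]))

-- keys of the accumulated dict are nodup and carry the weights of `seen`
lemma L_keys (coeff : List (String × Int)) (hpre : (coeff.map Prod.fst).Nodup)
    (seen : List Int) (hseen : seen.Nodup) :
    ((seen.flatMap (pvF coeff)).map Prod.fst).Nodup := by
  rw [List.map_flatMap]
  rw [List.nodup_flatMap]
  constructor
  · intro w _; exact pvF_map_fst_nodup coeff w hpre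
  · refine List.Pairwise.imp ?_ hseen
    intro a b hab
    intro x hxa hxb
    obtain ⟨p, hp, hpx⟩ := List.mem_map.mp hxa
    obtain ⟨q, hq, hqx⟩ := List.mem_map.mp hxb
    have ha : weight_str p.1 = a := pv_weight_of_mem hp
    have hb : weight_str q.1 = b := pv_weight_of_mem hq
    rw [hpx] at ha
    rw [hqx] at hb
    exact hab (ha ▸ hb ▸ rfl)

-- the shared fold: updating with the weight-buckets along ks, starting from the dict for `seen`
lemma L_fold (coeff : List (String × Int)) (hpre : (coeff.map Prod.fst).Nodup) :
    ∀ (ks seen : List Int) (d : PySem.Dict String Int),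
    seen.Nodup →
    d.items = seen.flatMap (pvF coeff) →
    (ks.foldl (fun d w => d.update (pvF coeff w)) d).items
      = (PySem.Set.update seen ks).flatMap (pvF coeff) := by
  intro ks
  induction ks with
  | nil => intro seen d _ hd; simpa [PySem.Set.update] using hd
  | cons w rest ih =>
    intro seen d hseen hd
    have hkeys : d.keys.Nodup := by
      show (d.items.map Prod.fst).Nodup
      rw [hd]; exact L_keys coeff hpre seen hseen
    by_cases hw : w ∈ seen
    · have hadd : PySem.Set.add seen w = seen := by
        simp [PySem.Set.add, PySem.Set.contains, hw]
      have hid : d.update (pvF coeff w) = d := by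
        apply L_upd_id _ _ hkeys
        intro p hp
        apply PySem.Dict.get?_of_mem_items d _ hkeys
        rw [hd]
        exact List.mem_flatMap.mpr ⟨w, hw, hp⟩
      show ((rest.foldl (fun d w => d.update (pvF coeff w)) (d.update (pvF coeff w)))).items = _
      rw [hid]
      have := ih seen d hseen hd
      simpa [PySem.Set.update, hadd] using this
    · have hadd : PySem.Set.add seen w = seen ++ [w] := by
        simp [PySem.Set.add, PySem.Set.contains, hw]
      have hfresh : ∀ a ∈ pvF coeff w, d.contains a.1 = false := by
        intro a ha
        rw [← Bool.not_eq_true]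
        intro hc
        have : a.1 ∈ d.keys := (PySem.Dict.contains_iff_mem_keys d a.1).mp hc
        rw [show d.keys = d.items.map Prod.fst from rfl, hd, List.map_flatMap] at this
        obtain ⟨w', hw', hmem⟩ := List.mem_flatMap.mp this
        obtain ⟨q, hq, hqa⟩ := List.mem_map.mp hmem
        have h1 : weight_str q.1 = w' := pv_weight_of_mem hq
        have h2 : weight_str a.1 = w := pv_weight_of_mem ha
        rw [hqa, h2] at h1
        exact hw (h1 ▸ hw')
      have hupd : (d.update (pvF coeff w)).items = d.items ++ pvF coeff w := by
        show ((pvF coeff w).foldl (fun acc p => acc.insert p.1 p.2) d).items = _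
        rw [PySem.Dict.items_foldl_insert_fresh (pvF coeff w) Prod.fst Prod.snd d hfresh
          (pvF_map_fst_nodup coeff w hpre)]
        simp
      have hnew : (d.update (pvF coeff w)).items = (seen ++ [w]).flatMap (pvF coeff) := by
        rw [hupd, hd, List.flatMap_append]; simp
      have hseen' : (seen ++ [w]).Nodup := by
        refine List.Nodup.append hseen (List.nodup_singleton w) ?_
        intro x hx hxw
        simp only [List.mem_singleton] at hxw
        exact hw (hxw ▸ hx)
      show ((rest.foldl (fun d w => d.update (pvF coeff w)) (d.update (pvF coeff w)))).items = _
      have := ih (seen ++ [w]) (d.update (pvF coeff w)) hseen' hnew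
      simpa [PySem.Set.update, hadd] using this

lemma L_update_fresh : ∀ (xs : List Int) (s : List Int), xs.Nodup → (∀ x ∈ xs, x ∉ s) →
    PySem.Set.update s xs = s ++ xs := by
  intro xs
  induction xs with
  | nil => intro s _ _; simp [PySem.Set.update]
  | cons x t ih =>
    intro s hnd hfresh
    have hadd : PySem.Set.add s x = s ++ [x] := by
      simp [PySem.Set.add, PySem.Set.contains, hfresh x (by simp)]
    show PySem.Set.update (PySem.Set.add s x) t = _
    rw [hadd, ih (s ++ [x]) hnd.of_cons]
    · simp
    · intro y hy
      simp only [List.mem_append, List.mem_singleton]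
      rintro (h | rfl)
      · exact hfresh y (by simp [hy]) h
      · exact (List.nodup_cons.mp hnd).1 hy

lemma L_ofList_idem (xs : List Int) :
    PySem.Set.update ([] : List Int) (PySem.List.dedup xs) = PySem.List.dedup xs := by
  have := L_update_fresh (PySem.List.dedup xs) []
    (by simpa [PySem.List.dedup] using PySem.Set.nodup_ofList xs) (by simp)
  simpa using this

-- A computes the dedup-flatMap spec
lemma L_A (coeff : List (String × Int)) (n : Int) (k_vec : List Int)
    (hpre : (coeff.map Prod.fst).Nodup) :
    coeff_k_local coeff n k_vec = (PySem.List.dedup k_vec).flatMap (pvF coeff) := by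
  by_cases h1 : k_vec.length = 1
  · obtain ⟨k, rfl⟩ := List.length_eq_one_iff.mp h1
    rw [L_A1 coeff n k hpre]
    simp [PySem.List.dedup, PySem.Set.ofList, PySem.Set.update, PySem.Set.add,
      PySem.Set.contains, PySem.Set.empty]
  · rw [coeff_k_local]
    rw [if_neg h1]
    have hmap : k_vec.attach.map (fun q => coeff_k_local coeff n [q.1])
        = k_vec.map (fun w => pvF coeff w) := by
      have hfn : (fun (q : {x // x ∈ k_vec}) => coeff_k_local coeff n [q.1])
          = fun q => pvF coeff q.1 := funext fun q => L_A1 coeff n q.1 hpre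
      rw [hfn]
      rw [show (fun (q : {x // x ∈ k_vec}) => pvF coeff q.1)
            = (fun w => pvF coeff w) ∘ Subtype.val from rfl]
      rw [← List.map_map, List.attach_map_subtype_val]
    rw [hmap, List.foldl_map]
    have := L_fold coeff hpre k_vec [] PySem.Dict.empty List.nodup_nil rfl
    simpa [PySem.List.dedup, PySem.Set.ofList] using this

-- B computes the same spec
lemma L_B (coeff : List (String × Int)) (n : Int) (k_vec : List Int)
    (hpre : (coeff.map Prod.fst).Nodup) :
    coeff_k_local_alt coeff n k_vec = (PySem.List.dedup k_vec).flatMap (pvF coeff) := by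
  unfold coeff_k_local_alt
  have hbucket : ∀ w, ((coeff.foldl (fun d p =>
      if p.2 ≠ 0 then d.insert (weight_str p.1) (d.getD (weight_str p.1) [] ++ [p]) else d)
      (PySem.Dict.empty : PySem.Dict Int (List (String × Int)))).getD w []) = pvF coeff w := by
    intro w
    rw [L_buckets w coeff PySem.Dict.empty]
    simp [pvF]
  have hfun : (fun (o : PySem.Dict String Int) (w : Int) =>
      ((coeff.foldl (fun d p =>
        if p.2 ≠ 0 then d.insert (weight_str p.1) (d.getD (weight_str p.1) [] ++ [p]) else d)
        (PySem.Dict.empty : PySem.Dict Int (List (String × Int)))).getD w []).foldl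
        (fun o p => o.insert p.1 p.2) o)
      = (fun o w => o.update (pvF coeff w)) := by
    funext o w
    rw [hbucket w]
    rfl
  simp only []
  rw [hfun]
  rw [L_fold coeff hpre (PySem.List.dedup k_vec) [] PySem.Dict.empty List.nodup_nil rfl]
  rw [L_ofList_idem]

-- ===== VERDICT (by name: the statement is the Claim_ definition above) =====
theorem coeff_k_local_spec : Claim_equal_coeff_k_local := by
  intro coeff n k_vec _ hpre
  show coeff_k_local coeff n k_vec = coeff_k_local_alt coeff n k_vec
  rw [L_A coeff n k_vec hpre, L_B coeff n k_vec hpre]
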